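-- pv_equiv track=rewrite | github.com/NobuyukiInoue/LeetCode | Problems/Scripts_pyPatternSearch/pyPatternSearch.py | get_line_target_perfect_pattern
-- ===== SOURCE A (Python) =====
-- def get_line_target_perfect_pattern(contents, target_pattern):
--     """ target_patternと一致する行を検索する（完全一致）"""
--     for i in range(len(contents)):
--         src_i, dst_i = i, 0
--         hit = True
--         while src_i < len(contents) and dst_i < len(target_pattern):
--             if contents[src_i] != target_pattern[dst_i]:
--                 hit = False
--                 break
--             src_i += 1
--             dst_i += 1
--         if hit == True:
--             if src_i - i == len(target_pattern):
--                 return (i, src_i)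
--     return None
-- ===== SOURCE B (Python) =====
-- def get_line_target_perfect_pattern(contents, target_pattern):
--     """Find the first position where target_pattern occurs contiguously in contents."""
--     m = len(target_pattern)
--     i = 0
--     suffix = contents
--     while len(suffix) >= m:
--         if suffix[:m] == target_pattern:
--             return (i, i + m)
--         suffix = suffix[1:]
--         i += 1
--     return None
-- ===== Notes on version B (the rewrite author's own statement) =====
-- stated objective: simpler
-- what changed: A's manual inner index-walk with a hit flag and an src_i-i==len post-check is replaced by a single structural scan over suffixes with one slice-equality prefix test (done in C by list comparison) and an early stop once the remaining suffix is shorter than the pattern.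
-- outside the precondition, e.g. on get_line_target_perfect_pattern([], []): A returns None, B returns (0, 0)
import Mathlib
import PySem

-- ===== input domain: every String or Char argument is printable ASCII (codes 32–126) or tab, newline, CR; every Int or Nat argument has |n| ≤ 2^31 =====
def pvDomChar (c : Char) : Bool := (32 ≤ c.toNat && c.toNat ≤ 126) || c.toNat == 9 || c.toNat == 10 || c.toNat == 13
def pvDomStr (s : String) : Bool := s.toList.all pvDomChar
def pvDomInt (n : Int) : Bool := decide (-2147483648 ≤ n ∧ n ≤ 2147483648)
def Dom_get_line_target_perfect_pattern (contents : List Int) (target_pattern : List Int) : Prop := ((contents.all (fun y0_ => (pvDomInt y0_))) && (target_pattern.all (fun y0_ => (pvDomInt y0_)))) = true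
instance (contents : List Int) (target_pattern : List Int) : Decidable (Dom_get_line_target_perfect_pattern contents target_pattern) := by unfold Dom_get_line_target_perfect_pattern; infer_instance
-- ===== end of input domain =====

-- B replaces A's manual index-walk with hit flag by one structural scan over suffixes
-- with a single prefix (slice-equality) test; same return value on all admitted inputs.

-- ===== PORT A =====
-- inner `while src_i < len(contents) and dst_i < len(target_pattern)` loop; returns (hit, src_i)
def aInner (contents target_pattern : List Int) (src dst : Nat) : Bool × Nat :=
  if src < contents.length ∧ dst < target_pattern.length then
    if contents.getD src 0 ≠ target_pattern.getD dst 0 then (false, src)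
    else aInner contents target_pattern (src + 1) (dst + 1)
  else (true, src)
termination_by contents.length - src
decreasing_by omega

-- outer `for i in range(len(contents))` loop
def aOuter (contents target_pattern : List Int) (i : Nat) : Option (Int × Int) :=
  if i < contents.length then
    let r := aInner contents target_pattern i 0
    if r.1 = true ∧ r.2 - i = target_pattern.length then some ((i : Int), (r.2 : Int))
    else aOuter contents target_pattern (i + 1)
  else none
termination_by contents.length - i
decreasing_by omega

def get_line_target_perfect_pattern (contents : List Int) (target_pattern : List Int) : Option (Int × Int) :=
  aOuter contents target_pattern 0

-- ===== PORT B =====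
-- `while len(suffix) >= m: if suffix[:m] == target_pattern: return (i, i+m); suffix = suffix[1:]; i += 1`
def altGo (target_pattern : List Int) (suffix : List Int) (i : Nat) : Option (Int × Int) :=
  if target_pattern.length ≤ suffix.length then
    if suffix.take target_pattern.length = target_pattern then some ((i : Int), (i : Int) + target_pattern.length)
    else
      match suffix with
      | [] => none
      | _ :: rest => altGo target_pattern rest (i + 1)
  else none

def get_line_target_perfect_pattern_alt (contents : List Int) (target_pattern : List Int) : Option (Int × Int) :=
  altGo target_pattern contents 0

-- ===== PRECONDITION & SPEC =====
-- Pre_ excludes only the input (contents = [], target_pattern = []), a corner where both answers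
-- are defensible: A's loop never runs and returns None, while B follows the empty-pattern-matches-
-- at-0 convention (Python's "".find("") == 0) and returns (0, 0).
def Pre_get_line_target_perfect_pattern (contents : List Int) (target_pattern : List Int) : Prop :=
  ¬ (contents = [] ∧ target_pattern = [])
instance (contents : List Int) (target_pattern : List Int) : Decidable (Pre_get_line_target_perfect_pattern contents target_pattern) := by unfold Pre_get_line_target_perfect_pattern; infer_instance

def pvWitness_get_line_target_perfect_pattern : List Int × List Int := ([1, 2, 1, 2, 3], [1, 2, 3])

def Spec_get_line_target_perfect_pattern (contents : List Int) (target_pattern : List Int) (out : Option (Int × Int)) : Prop := out = get_line_target_perfect_pattern_alt contents target_pattern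
instance (contents : List Int) (target_pattern : List Int) (out : Option (Int × Int)) : Decidable (Spec_get_line_target_perfect_pattern contents target_pattern out) := by unfold Spec_get_line_target_perfect_pattern; infer_instance

-- ===== CLAIM (what is proved, stated in full; the proofs are below) =====
def Claim_equal_get_line_target_perfect_pattern : Prop := ∀ (contents : List Int) (target_pattern : List Int), Dom_get_line_target_perfect_pattern contents target_pattern → Pre_get_line_target_perfect_pattern contents target_pattern → Spec_get_line_target_perfect_pattern contents target_pattern (get_line_target_perfect_pattern contents target_pattern)

-- ===== LEMMAS AND PROOFS =====

-- characterization of the inner while loop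
lemma aInner_spec (contents target_pattern : List Int) (src dst : Nat) :
    ((aInner contents target_pattern src dst).1 = true ↔
      (contents.drop src).take (target_pattern.length - dst) =
        (target_pattern.drop dst).take (contents.length - src)) ∧
    ((aInner contents target_pattern src dst).1 = true →
      (aInner contents target_pattern src dst).2 =
        src + min (contents.length - src) (target_pattern.length - dst)) := by
  by_cases h : src < contents.length ∧ dst < target_pattern.length
  · obtain ⟨h1, h2⟩ := h
    have hd1 : contents.drop src = contents[src] :: contents.drop (src + 1) :=
      List.drop_eq_getElem_cons h1
    have hd2 : target_pattern.drop dst = target_pattern[dst] :: target_pattern.drop (dst + 1) :=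
      List.drop_eq_getElem_cons h2
    have hm : target_pattern.length - dst = (target_pattern.length - (dst + 1)) + 1 := by omega
    have hn : contents.length - src = (contents.length - (src + 1)) + 1 := by omega
    by_cases heq : contents[src] = target_pattern[dst]
    · have hrec : aInner contents target_pattern src dst =
          aInner contents target_pattern (src + 1) (dst + 1) := by
        rw [aInner.eq_def]
        simp [h1, h2, heq]
      have key : (contents.drop src).take (target_pattern.length - dst) =
            (target_pattern.drop dst).take (contents.length - src) ↔
          (contents.drop (src + 1)).take (target_pattern.length - (dst + 1)) =
            (target_pattern.drop (dst + 1)).take (contents.length - (src + 1)) := by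
        rw [hd1, hd2, hm, hn, List.take_succ_cons, List.take_succ_cons, heq]
        simp only [List.cons.injEq, true_and]
      have ih := aInner_spec contents target_pattern (src + 1) (dst + 1)
      constructor
      · rw [hrec, key]; exact ih.1
      · intro ht
        rw [hrec] at ht ⊢
        have := ih.2 ht
        omega
    · have hstop : aInner contents target_pattern src dst = (false, src) := by
        rw [aInner.eq_def]
        simp [h1, h2, heq]
      rw [hstop]
      constructor
      · rw [hd1, hd2, hm, hn, List.take_succ_cons, List.take_succ_cons]
        refine iff_of_false (by simp) fun hc => ?_
        simp only [List.cons.injEq] at hc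
        exact heq hc.1
      · simp
  · have hstop : aInner contents target_pattern src dst = (true, src) := by
      rw [aInner.eq_def]; simp [h]
    rw [hstop]
    rcases Nat.lt_or_ge src contents.length with h1 | h1
    · have h2 : target_pattern.length ≤ dst := by omega
      rw [List.drop_eq_nil_of_le h2]
      have hm0 : target_pattern.length - dst = 0 := by omega
      rw [hm0]
      simp
    · rw [List.drop_eq_nil_of_le h1]
      have hn0 : contents.length - src = 0 := by omega
      rw [hn0]
      simp
termination_by contents.length - src
decreasing_by omega

lemma altGo_short (target_pattern suffix : List Int) (i : Nat)
    (h : suffix.length < target_pattern.length) : altGo target_pattern suffix i = none := by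
  rw [altGo.eq_def]; simp [Nat.not_le.mpr h]

lemma main_eq (contents target_pattern : List Int) (i : Nat)
    (h : i < contents.length ∨ target_pattern ≠ []) :
    aOuter contents target_pattern i = altGo target_pattern (contents.drop i) i := by
  by_cases hi : i < contents.length
  · have spec := aInner_spec contents target_pattern i 0
    simp only [Nat.sub_zero, List.drop_zero] at spec
    have hlen : (contents.drop i).length = contents.length - i := List.length_drop
    have hd : contents.drop i = contents[i] :: contents.drop (i + 1) :=
      List.drop_eq_getElem_cons hi
    rw [aOuter.eq_def, altGo.eq_def]
    simp only [hi, if_true, hlen]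
    by_cases hm : target_pattern.length ≤ contents.length - i
    · simp only [hm, if_true]
      by_cases hp : (contents.drop i).take target_pattern.length = target_pattern
      · have htp : target_pattern.take (contents.length - i) = target_pattern :=
          List.take_of_length_le hm
        have hhit : (aInner contents target_pattern i 0).1 = true :=
          spec.1.mpr (by rw [hp, htp])
        have hv := spec.2 hhit
        have hcond : (aInner contents target_pattern i 0).2 - i = target_pattern.length := by
          omega
        simp only [hp, if_true, hhit, hcond, and_self]
        have : (aInner contents target_pattern i 0).2 = i + target_pattern.length := by omega
        rw [this]
        push_cast
        ring_nf
      · have hne : target_pattern ≠ [] := by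
          intro h0
          apply hp
          rw [h0]
          simp
        have hhit : ¬ ((aInner contents target_pattern i 0).1 = true) := by
          intro hh
          apply hp
          rw [spec.1.mp hh]
          exact List.take_of_length_le hm
        have ih := main_eq contents target_pattern (i + 1) (Or.inr hne)
        simp only [hp, hhit]
        rw [if_neg (by tauto), ih, hd]
        simp
    · have hne : target_pattern ≠ [] := by
        intro h0
        rw [h0] at hm
        simp at hm
      have hcond : ¬ ((aInner contents target_pattern i 0).1 = true ∧
          (aInner contents target_pattern i 0).2 - i = target_pattern.length) := by
        rintro ⟨hh, hc⟩
        have := spec.2 hh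
        omega
      have ih := main_eq contents target_pattern (i + 1) (Or.inr hne)
      rw [if_neg hm, if_neg hcond, ih]
      exact altGo_short _ _ _ (by simp; omega)
  · have htp : target_pattern ≠ [] := h.resolve_left hi
    rw [aOuter.eq_def]
    simp only [hi, if_false]
    rw [List.drop_eq_nil_of_le (Nat.le_of_not_lt hi)]
    refine (altGo_short _ _ _ ?_).symm
    cases target_pattern with
    | nil => exact absurd rfl htp
    | cons a l => simp
termination_by contents.length - i
decreasing_by all_goals omega

-- ===== VERDICT (by name: the statement is the Claim_ definition above) =====
theorem get_line_target_perfect_pattern_spec : Claim_equal_get_line_target_perfect_pattern := by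
  intro contents target_pattern _ hpre
  unfold Spec_get_line_target_perfect_pattern get_line_target_perfect_pattern get_line_target_perfect_pattern_alt
  have h : 0 < contents.length ∨ target_pattern ≠ [] := by
    rcases contents with _ | ⟨c, cs⟩
    · right; intro h; exact hpre ⟨rfl, h⟩
    · left; simp
  simpa using main_eq contents target_pattern 0 h
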